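-- pv_equiv track=rewrite | github.com/alexandrasouly/algorithms_datastructures | ctci/chapter_1_arrays_strings/string_compression.py | needs_compression
-- ===== SOURCE A (Python) =====
-- def needs_compression(my_str: str):
--     compressed_length = 0
--     counter = 1
--     for idx in range(1, len(my_str)):
--         if my_str[idx] != my_str[idx-1]:
--             compressed_length += 1+len(str(counter))
--             counter = 1
--         else:
--             counter += 1
--     # last one
--     compressed_length += 1+len(str(counter))
--     return (compressed_length < len(my_str))
-- ===== SOURCE B (Python) =====
-- def needs_compression(my_str: str):
--     # staged passes: (1) boundary positions where adjacent chars differ,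
--     # (2) run lengths as differences of consecutive boundaries, (3) sum widths
--     n = len(my_str)
--     cuts = [0] + [i + 1 for i, (a, b) in enumerate(zip(my_str, my_str[1:])) if a != b] + [n]
--     compressed = sum(1 + len(str(hi - lo)) for lo, hi in zip(cuts, cuts[1:]))
--     return compressed < n
-- ===== Notes on version B (the rewrite author's own statement) =====
-- stated objective: alternative
-- what changed: Replaces A's single-pass mutable counter with terminal fixup by staged passes: collect the boundary positions where adjacent characters differ via enumerate/zip, take pairwise differences of consecutive boundaries as run lengths, and sum each run's compressed width.
import Mathlib
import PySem

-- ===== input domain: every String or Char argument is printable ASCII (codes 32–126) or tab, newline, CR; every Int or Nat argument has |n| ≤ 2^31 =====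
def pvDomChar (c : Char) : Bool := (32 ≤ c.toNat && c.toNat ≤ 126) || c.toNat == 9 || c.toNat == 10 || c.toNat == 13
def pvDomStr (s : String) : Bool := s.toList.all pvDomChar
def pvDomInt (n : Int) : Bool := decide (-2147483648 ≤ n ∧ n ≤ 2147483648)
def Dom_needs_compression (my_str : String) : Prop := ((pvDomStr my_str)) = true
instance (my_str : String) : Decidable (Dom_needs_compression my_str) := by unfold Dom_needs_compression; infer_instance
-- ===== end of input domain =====

-- B replaces A's running-counter scan by staged passes: boundary positions (enumerate/zip), pairwise differences as run lengths, sum of widths (alternative decomposition, same cost).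

-- ===== PORT A =====
def needs_compression (my_str : String) : Bool :=
  let cs := my_str.toList
  let n : Int := PySem.Str.len my_str
  let st := (PySem.List.pyRange 1 n 1).foldl
    (fun (st : Int × Int) idx =>
      if PySem.List.pyGetD cs idx ' ' ≠ PySem.List.pyGetD cs (idx - 1) ' '
      then (st.1 + 1 + ((PySem.Int.toChars st.2).length : Int), 1)
      else (st.1, st.2 + 1))
    (0, 1)
  decide (st.1 + 1 + ((PySem.Int.toChars st.2).length : Int) < n)

-- ===== PORT B =====
def needs_compression_alt (my_str : String) : Bool :=
  let cs := my_str.toList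
  let n : Int := PySem.Str.len my_str
  let cuts : List Int :=
    0 :: ((((PySem.List.enumerate (cs.zip cs.tail) 0).filter
              (fun p => p.2.1 != p.2.2)).map (fun p => p.1 + 1)) ++ [n])
  let compressed : Int :=
    ((cuts.zip cuts.tail).map (fun p => 1 + ((PySem.Int.toChars (p.2 - p.1)).length : Int))).sum
  decide (compressed < n)

-- ===== PRECONDITION & SPEC =====
def Spec_needs_compression (my_str : String) (out : Bool) : Prop := out = needs_compression_alt my_str
instance (my_str : String) (out : Bool) : Decidable (Spec_needs_compression my_str out) := by unfold Spec_needs_compression; infer_instance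

-- ===== CLAIM (what is proved, stated in full; the proofs are below) =====
def Claim_equal_needs_compression : Prop := ∀ (my_str : String), Dom_needs_compression my_str → Spec_needs_compression my_str (needs_compression my_str)

-- ===== LEMMAS AND PROOFS =====

-- compressed width of one run of length L: the marker char plus the digits of L
def fB (L : Int) : Int := 1 + ((PySem.Int.toChars L).length : Int)

-- A's loop body over explicit previous character and (compressed_length, counter) state
def loopA : List Char → Char → Int × Int → Int × Int
  | [], _, st => st
  | c :: rest, prev, st =>
    if c ≠ prev then loopA rest c (st.1 + 1 + ((PySem.Int.toChars st.2).length : Int), 1)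
    else loopA rest c (st.1, st.2 + 1)

def postA (st : Int × Int) : Int := st.1 + 1 + ((PySem.Int.toChars st.2).length : Int)

-- run-length list (proof-side common spec)
def rll : List Char → List Int
  | [] => []
  | c :: rest =>
    ((1 : Int) + ((rest.takeWhile (· == c)).length : Int))
      :: rll (rest.drop (rest.takeWhile (· == c)).length)
termination_by l => l.length
decreasing_by
  simp only [List.length_drop, List.length_cons]
  omega

theorem rll_nil : rll [] = [] := by rw [rll]

theorem rll_cons (c : Char) (rest : List Char) :
    rll (c :: rest) = ((1 : Int) + ((rest.takeWhile (· == c)).length : Int))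
      :: rll (rest.drop (rest.takeWhile (· == c)).length) := by rw [rll]

-- boundary positions (proof-side characterization of B's first stage)
def bnds : List Char → Int → List Int
  | [], _ => []
  | [_], _ => []
  | c :: d :: rest, k =>
    if c = d then bnds (d :: rest) (k + 1) else (k + 1) :: bnds (d :: rest) (k + 1)

-- pairwise differences of consecutive elements
def pdiffs (l : List Int) : List Int := (l.zip l.tail).map (fun p => p.2 - p.1)

theorem bridge (cs : List Char) (l : List Char) : ∀ (i : Nat) (st : Int × Int) (hi : i < cs.length),
    cs.drop (i + 1) = l →
    (PySem.List.pyRange ((i : Int) + 1) (cs.length : Int) 1).foldl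
      (fun (st : Int × Int) idx =>
        if PySem.List.pyGetD cs idx ' ' ≠ PySem.List.pyGetD cs (idx - 1) ' '
        then (st.1 + 1 + ((PySem.Int.toChars st.2).length : Int), 1)
        else (st.1, st.2 + 1)) st = loopA l (cs[i]'hi) st := by
  induction l with
  | nil =>
    intro i st hi hd
    have hlen : cs.length = i + 1 := by
      have := congrArg List.length hd; simp at this; omega
    rw [PySem.List.pyRange_one_eq_nil (by exact_mod_cast hlen.le)]
    rfl
  | cons c rest ih =>
    intro i st hi hd
    have hi1 : i + 1 < cs.length := by
      have := congrArg List.length hd; simp at this; omega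
    have hc : cs[i + 1]'hi1 = c := by
      have h1 : cs[i + 1]? = some c := by rw [← List.head?_drop, hd]; rfl
      have h2 : cs[i + 1]? = some (cs[i + 1]'hi1) := List.getElem?_eq_getElem hi1
      rw [h1] at h2; exact (Option.some.inj h2).symm
    have hdrop : cs.drop (i + 1 + 1) = rest := by
      rw [← List.tail_drop, hd]; rfl
    have hr : PySem.List.pyRange ((i : Int) + 1) (cs.length : Int) 1
        = ((i : Int) + 1) :: PySem.List.pyRange ((i : Int) + 1 + 1) (cs.length : Int) 1 :=
      PySem.List.pyRange_one_cons (by exact_mod_cast hi1)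
    rw [hr, List.foldl_cons]
    have hg1 : PySem.List.pyGetD cs ((i : Int) + 1) ' ' = cs[i + 1]'hi1 := by
      have : ((i : Int) + 1) = ((i + 1 : Nat) : Int) := by push_cast; ring
      rw [this, PySem.List.pyGetD_natCast, List.getD_eq_getElem _ _ hi1]
    have hg0 : PySem.List.pyGetD cs ((i : Int) + 1 - 1) ' ' = cs[i]'hi := by
      have : ((i : Int) + 1 - 1) = ((i : Nat) : Int) := by omega
      rw [this, PySem.List.pyGetD_natCast, List.getD_eq_getElem _ _ hi]
    have ih' := fun st' => ih (i + 1) st' hi1 hdrop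
    push_cast at ih'
    simp only [hg1, hg0, loopA, ← hc]
    simp only [ne_eq] at ih' ⊢
    split_ifs with hne
    · exact ih' _
    · exact ih' _

-- A's loop computes the width sum over the remaining runs
theorem lemA (l : List Char) : ∀ (p : Char) (cl cnt : Int),
    postA (loopA l p (cl, cnt)) =
      cl + fB (cnt + ((l.takeWhile (· == p)).length : Int))
        + ((rll (l.drop (l.takeWhile (· == p)).length)).map fB).sum := by
  induction l with
  | nil =>
    intro p cl cnt
    simp only [loopA, postA, fB, List.takeWhile_nil, List.length_nil, Nat.cast_zero, add_zero,
      List.drop_nil, rll_nil, List.map_nil, List.sum_nil]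
    ring
  | cons c rest ih =>
    intro p cl cnt
    by_cases hcp : c = p
    · subst hcp
      simp only [loopA, ne_eq, not_true_eq_false, if_false, List.takeWhile_cons,
        beq_self_eq_true, if_true, List.length_cons, List.drop_succ_cons]
      rw [ih c cl (cnt + 1)]
      simp only [fB]
      push_cast; ring_nf
    · have hbe : (c == p) = false := by simp [hcp]
      simp only [loopA, ne_eq, hcp, not_false_eq_true, if_true, List.takeWhile_cons, hbe,
        Bool.false_eq_true, if_false, List.length_nil, Nat.cast_zero, add_zero, List.drop_zero]
      rw [ih c (cl + 1 + ((PySem.Int.toChars cnt).length : Int)) 1, rll_cons]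
      simp only [List.map_cons, List.sum_cons, fB]
      ring_nf

-- B's first stage equals bnds
theorem lemE (cs : List Char) : ∀ (k : Int),
    (((PySem.List.enumerate (cs.zip cs.tail) k).filter
        (fun p => p.2.1 != p.2.2)).map (fun p => p.1 + 1)) = bnds cs k := by
  induction cs with
  | nil => intro k; simp [PySem.List.enumerate_nil, bnds]
  | cons c rest ih =>
    intro k
    cases rest with
    | nil => simp [PySem.List.enumerate_nil, bnds]
    | cons d rest' =>
      simp only [List.tail_cons, List.zip_cons_cons, PySem.List.enumerate_cons]
      rw [show bnds (c :: d :: rest') k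
          = if c = d then bnds (d :: rest') (k + 1) else (k + 1) :: bnds (d :: rest') (k + 1) from rfl]
      by_cases hcd : c = d
      · rw [if_pos hcd, List.filter_cons_of_neg (by simp [hcd]), ← ih (k + 1)]
        simp only [List.tail_cons]
      · rw [if_neg hcd, List.filter_cons_of_pos (by simp [hcd]), List.map_cons, ← ih (k + 1)]
        simp only [List.tail_cons]

theorem bnds_skip1 (c : Char) (rest : List Char) : ∀ (k : Int),
    rest.dropWhile (· == c) = [] → bnds (c :: rest) k = [] := by
  induction rest with
  | nil => intro k _; rfl
  | cons e r ih =>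
    intro k hd
    rw [List.dropWhile_cons] at hd
    by_cases hec : e = c
    · subst hec
      simp only [beq_self_eq_true, if_true] at hd
      show bnds (e :: e :: r) k = []
      rw [bnds, if_pos rfl]
      exact ih (k + 1) hd
    · simp [hec] at hd

theorem bnds_skip2 (c d : Char) (r'' : List Char) (rest : List Char) : ∀ (k : Int),
    rest.dropWhile (· == c) = d :: r'' →
    bnds (c :: rest) k =
      (k + 1 + ((rest.takeWhile (· == c)).length : Int))
        :: bnds (d :: r'') (k + 1 + ((rest.takeWhile (· == c)).length : Int)) := by
  induction rest with
  | nil => intro k hd; simp at hd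
  | cons e r ih =>
    intro k hd
    rw [List.dropWhile_cons] at hd
    by_cases hec : e = c
    · subst hec
      simp only [beq_self_eq_true, if_true] at hd
      show bnds (e :: e :: r) k = _
      rw [bnds, if_pos rfl, ih (k + 1) hd]
      simp only [List.takeWhile_cons, beq_self_eq_true, if_true, List.length_cons]
      push_cast; ring_nf
    · simp only [beq_iff_eq, hec, if_false] at hd
      obtain ⟨hde, hr⟩ := List.cons.inj hd
      subst hde; subst hr
      have hbe : (e == c) = false := by simp [hec]
      rw [bnds, if_neg (fun h => hec h.symm)]
      simp [hbe]

-- pairwise differences of the cut positions are the run lengths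
theorem lemD (cs : List Char) (k : Int) (hne : cs ≠ []) :
    pdiffs (k :: (bnds cs k ++ [k + (cs.length : Int)])) = rll cs := by
  match cs, hne with
  | c :: rest, _ =>
    cases hd : rest.dropWhile (· == c) with
    | nil =>
      have htw : (rest.takeWhile (· == c)).length = rest.length := by
        have := List.takeWhile_append_dropWhile (p := (· == c)) (l := rest)
        have hlen := congrArg List.length this
        rw [hd] at hlen; simp at hlen; omega
      rw [bnds_skip1 c rest k hd, rll_cons, htw, List.drop_length, rll_nil]
      simp only [pdiffs, List.nil_append, List.tail_cons, List.zip_cons_cons, List.zip_nil_right,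
        List.map_cons, List.map_nil, List.length_cons]
      congr 1
      push_cast; ring
    | cons d r'' =>
      have hlen : rest.length = (rest.takeWhile (· == c)).length + 1 + r''.length := by
        have := List.takeWhile_append_dropWhile (p := (· == c)) (l := rest)
        have hl := congrArg List.length this
        rw [hd] at hl; simp at hl; omega
      have hdrop : rest.drop (rest.takeWhile (· == c)).length = d :: r'' := by
        calc rest.drop (rest.takeWhile (· == c)).length
            = (rest.takeWhile (· == c) ++ rest.dropWhile (· == c)).drop
                (rest.takeWhile (· == c)).length := by
              rw [List.takeWhile_append_dropWhile]
          _ = rest.dropWhile (· == c) := List.drop_left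
          _ = d :: r'' := hd
      rw [bnds_skip2 c d r'' rest k hd, rll_cons, hdrop]
      have hrec := lemD (d :: r'') (k + 1 + ((rest.takeWhile (· == c)).length : Int)) (by simp)
      have hend : k + ((c :: rest).length : Int)
          = (k + 1 + ((rest.takeWhile (· == c)).length : Int)) + ((d :: r'').length : Int) := by
        simp only [List.length_cons, hlen]; push_cast; ring
      rw [hend]
      simp only [pdiffs, List.cons_append, List.tail_cons, List.zip_cons_cons, List.map_cons] at hrec ⊢
      rw [hrec]
      congr 1
      ring
termination_by cs.length
decreasing_by
  simp only [List.length_cons]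
  omega

theorem main_eq (my_str : String) :
    needs_compression my_str = needs_compression_alt my_str := by
  unfold needs_compression needs_compression_alt
  cases hcs : my_str.toList with
  | nil =>
    simp only [hcs, PySem.Str.len_eq]
    decide
  | cons c rest =>
    simp only [hcs, PySem.Str.len_eq]
    have hi0 : 0 < (c :: rest).length := by simp
    have hb := bridge (c :: rest) rest 0 (0, 1) hi0 (by simp)
    simp only [List.getElem_cons_zero, Nat.cast_zero, zero_add] at hb
    rw [hb]
    have hA := lemA rest c 0 1
    unfold postA at hA
    rw [hA, lemE (c :: rest) 0]
    have hD := lemD (c :: rest) 0 (by simp)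
    simp only [zero_add] at hD
    have hmm : ((((0 : Int) :: (bnds (c :: rest) 0 ++ [(((c :: rest).length : Nat) : Int)])).zip
          (((0 : Int) :: (bnds (c :: rest) 0 ++ [(((c :: rest).length : Nat) : Int)])).tail)).map
          (fun p => 1 + ((PySem.Int.toChars (p.2 - p.1)).length : Int)))
        = (rll (c :: rest)).map fB := by
      rw [← hD]
      simp only [pdiffs, List.map_map]
      rfl
    rw [hmm, rll_cons]
    simp only [List.map_cons, List.sum_cons, fB, zero_add]
    rfl

-- ===== VERDICT (by name: the statement is the Claim_ definition above) =====
theorem needs_compression_spec : Claim_equal_needs_compression := by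
  intro my_str _
  unfold Spec_needs_compression
  exact main_eq my_str
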